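-- pv_equiv track=rewrite | github.com/Bigsby/aoc | 2016/20/py/run.py | solve
-- ===== SOURCE A (Python) =====
-- from typing import List, Tuple
--
-- Range = Tuple[int, int]
--
-- def solve(ranges: List[Range]) -> Tuple[int, int]:
--     part1_result = 0
--     ranges.sort()
--     previous_upper = 0
--     allowed_count = 0
--     for lower, upper in ranges:
--         if upper <= previous_upper:
--             continue
--         if lower > previous_upper + 1:
--             allowed_count += lower - previous_upper - 1
--             if part1_result == 0:
--                 part1_result = previous_upper + 1
--         previous_upper = upper
--     return part1_result, allowed_count
-- ===== SOURCE B (Python) =====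
-- def solve(ranges):
--     ranges.sort()
--     # phase 1: merge sorted ranges into blocks; the seed block (-1, 0) marks IP 0
--     # as blocked, so everything below 1 is absorbed into it
--     merged = [(-1, 0)]
--     for lower, upper in ranges:
--         last_lower, last_upper = merged[-1]
--         if upper <= last_upper:
--             continue  # already covered by the last block
--         if lower <= last_upper + 1:
--             merged[-1] = (last_lower, upper)  # overlaps/adjacent: extend the block
--         else:
--             merged.append((lower, upper))
--     # phase 2: every gap between consecutive merged blocks is allowed
--     part1 = merged[0][1] + 1 if len(merged) > 1 else 0
--     allowed = sum(nl - cu - 1 for (_, cu), (nl, _) in zip(merged, merged[1:]))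
--     return part1, allowed
-- ===== Notes on version B (the rewrite author's own statement) =====
-- stated objective: alternative
-- what changed: Replaces A's single stateful scan (tracking previous_upper/part1/allowed in one loop with skip and gap branches) by a two-phase decomposition: first fold the sorted ranges into an explicit list of merged blocks seeded with (-1,0) for blocked IP 0, then derive part1 from the first block and the allowed count as the sum of gaps between consecutive blocks.
import Mathlib
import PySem

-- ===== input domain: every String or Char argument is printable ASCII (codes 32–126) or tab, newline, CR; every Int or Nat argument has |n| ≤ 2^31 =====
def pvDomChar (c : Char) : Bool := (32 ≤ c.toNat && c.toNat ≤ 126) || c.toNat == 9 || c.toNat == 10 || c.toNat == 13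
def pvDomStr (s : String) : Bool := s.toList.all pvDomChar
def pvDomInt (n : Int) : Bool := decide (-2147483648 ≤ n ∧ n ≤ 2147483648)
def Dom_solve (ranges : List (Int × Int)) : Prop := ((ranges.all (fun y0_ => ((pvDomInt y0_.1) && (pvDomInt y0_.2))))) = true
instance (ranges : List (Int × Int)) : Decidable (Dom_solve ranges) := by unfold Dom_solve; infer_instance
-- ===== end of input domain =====

-- B replaces A's one stateful scan by merge-into-blocks then sum-the-gaps (alternative
-- decomposition, same cost). Both Pythons sort `ranges` in place (same mutation); the
-- equivalence proved here is about the return value.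

-- ===== PORT A =====
-- A's loop body: state (part1_result, previous_upper, allowed_count)
def solveStepA (st : Int × Int × Int) (r : Int × Int) : Int × Int × Int :=
  if r.2 ≤ st.2.1 then st
  else if r.1 > st.2.1 + 1 then
    ((if st.1 = 0 then st.2.1 + 1 else st.1), r.2, st.2.2 + (r.1 - st.2.1 - 1))
  else (st.1, r.2, st.2.2)

def solve (ranges : List (Int × Int)) : Int × Int :=
  let s := PySem.List.sorted2 ranges Prod.fst Prod.snd   -- ranges.sort(): tuple order
  let st := s.foldl solveStepA (0, 0, 0)
  (st.1, st.2.2)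

-- ===== PORT B =====
-- Source B keeps `merged` with its last block at the list's end; the port keeps the block
-- list REVERSED (head = Python's merged[-1]) — a faithful cons rendering of append/
-- modify-last — and reverses at the end.
def mergeStep (acc : List (Int × Int)) (r : Int × Int) : List (Int × Int) :=
  match acc with
  | (ll, lu) :: rest =>
      if r.2 ≤ lu then (ll, lu) :: rest          -- already covered by the last block
      else if r.1 ≤ lu + 1 then (ll, r.2) :: rest -- overlaps/adjacent: extend the block
      else r :: (ll, lu) :: rest                  -- new block
  | [] => [r]   -- unreachable: the accumulator is seeded non-empty

-- sum(nl - cu - 1 for (_, cu), (nl, _) in zip(merged, merged[1:]))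
def gapsOf (merged : List (Int × Int)) : Int :=
  ((merged.zip merged.tail).map (fun p => p.2.1 - p.1.2 - 1)).sum

def solve_alt (ranges : List (Int × Int)) : Int × Int :=
  let s := PySem.List.sorted2 ranges Prod.fst Prod.snd   -- ranges.sort(): tuple order
  let merged := (s.foldl mergeStep [((-1 : Int), (0 : Int))]).reverse
  let p1 := if 1 < merged.length then (merged.headD (0, 0)).2 + 1 else 0
  (p1, gapsOf merged)

-- ===== PRECONDITION & SPEC =====
def Spec_solve (ranges : List (Int × Int)) (out : Int × Int) : Prop := out = solve_alt ranges
instance (ranges : List (Int × Int)) (out : Int × Int) : Decidable (Spec_solve ranges out) := by unfold Spec_solve; infer_instance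

-- ===== CLAIM (what is proved, stated in full; the proofs are below) =====
def Claim_equal_solve : Prop := ∀ (ranges : List (Int × Int)), Dom_solve ranges → Spec_solve ranges (solve ranges)

-- ===== LEMMAS AND PROOFS =====

-- gaps of the reversed accumulator, recursively
def gapsRev : List (Int × Int) → Int
  | a :: b :: t => (a.1 - b.2 - 1) + gapsRev (b :: t)
  | _ => 0

theorem gapsOf_cons_cons (a b : Int × Int) (t : List (Int × Int)) :
    gapsOf (a :: b :: t) = (b.1 - a.2 - 1) + gapsOf (b :: t) := by
  simp [gapsOf]

theorem headD_reverse {α : Type} (l : List α) (d : α) : l.reverse.headD d = l.getLastD d := by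
  simp [List.head?_reverse, List.getLastD_eq_getLast?]

theorem getLastD_reverse {α : Type} (l : List α) (d : α) : l.reverse.getLastD d = l.headD d := by
  simp [List.getLast?_reverse, List.getLastD_eq_getLast?]

theorem gapsOf_append (x : Int × Int) :
    ∀ (ms : List (Int × Int)), ms ≠ [] →
      gapsOf (ms ++ [x]) = gapsOf ms + (x.1 - (ms.getLastD (0, 0)).2 - 1) := by
  intro ms
  induction ms with
  | nil => intro h; exact absurd rfl h
  | cons a t ih =>
    intro _
    cases t with
    | nil => simp [gapsOf]
    | cons b t' =>
      rw [List.cons_append, List.cons_append, gapsOf_cons_cons a b (t' ++ [x]),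
          show b :: (t' ++ [x]) = (b :: t') ++ [x] from (List.cons_append ..).symm, ih (by simp), gapsOf_cons_cons a b t']
      simp
      ring

theorem gapsOf_reverse : ∀ (acc : List (Int × Int)), gapsOf acc.reverse = gapsRev acc := by
  intro acc
  induction acc with
  | nil => rfl
  | cons x t ih =>
    cases t with
    | nil => rfl
    | cons y t' =>
      have hrev : (x :: y :: t').reverse = (y :: t').reverse ++ [x] := by simp
      rw [hrev, gapsOf_append x ((y :: t').reverse) (by simp), ih,
          getLastD_reverse]
      show _ = gapsRev (x :: y :: t')
      simp [gapsRev, List.headD]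
      ring

-- the loop invariant tying A's state to B's reversed block list
def StInv (st : Int × Int × Int) (acc : List (Int × Int)) : Prop :=
  acc ≠ [] ∧
  st.2.1 = (acc.headD (0, 0)).2 ∧
  st.2.2 = gapsRev acc ∧
  st.1 = (if acc.tail = [] then 0 else (acc.getLastD (0, 0)).2 + 1) ∧
  0 ≤ (acc.getLastD (0, 0)).2

theorem inv_step (st : Int × Int × Int) (acc : List (Int × Int)) (r : Int × Int)
    (h : StInv st acc) : StInv (solveStepA st r) (mergeStep acc r) := by
  obtain ⟨hne, hprev, hal, hp1, hlast⟩ := h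
  obtain ⟨p1, prev, al⟩ := st
  obtain ⟨l, u⟩ := r
  cases acc with
  | nil => exact absurd rfl hne
  | cons hd rest =>
    obtain ⟨ll, lu⟩ := hd
    simp only [List.headD] at hprev
    simp only at hprev hal hp1 hlast ⊢
    rw [hprev]
    by_cases hskip : u ≤ lu
    · -- A skips; B drops the covered range
      simp only [solveStepA, mergeStep, if_pos hskip]
      exact ⟨by simp, rfl, hal, hp1, hlast⟩
    · by_cases hgap : l > lu + 1
      · -- A counts a gap and starts a new segment; B opens a new block
        have hnl : ¬ l ≤ lu + 1 := by omega
        simp only [solveStepA, mergeStep, if_neg hskip, if_pos hgap, if_neg hnl]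
        refine ⟨by simp, rfl, ?_, ?_, ?_⟩
        · show al + (l - lu - 1) = gapsRev ((l, u) :: (ll, lu) :: rest)
          simp only [gapsRev, hal]; ring
        · show (if p1 = 0 then lu + 1 else p1)
              = (if ((l, u) :: (ll, lu) :: rest).tail = [] then 0
                 else (((l, u) :: (ll, lu) :: rest).getLastD (0, 0)).2 + 1)
          cases rest with
          | nil =>
            simp only [List.tail_cons, List.getLastD_cons, List.getLastD_nil] at hp1 ⊢
            simp [hp1]
          | cons b t =>
            simp only [List.tail_cons, List.getLastD_cons] at hp1 hlast ⊢
            rw [if_neg (List.cons_ne_nil b t)] at hp1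
            rw [if_neg (List.cons_ne_nil (ll, lu) (b :: t))]
            have hne0 : ¬ ((t.getLastD b).2 + 1 = 0) := by omega
            rw [hp1, if_neg hne0]
        · simp only [List.getLastD_cons] at hlast ⊢
          exact hlast
      · -- A extends previous_upper; B extends the last block
        have hl : l ≤ lu + 1 := by omega
        simp only [solveStepA, mergeStep, if_neg hskip, if_neg hgap, if_pos hl]
        refine ⟨by simp, rfl, ?_, ?_, ?_⟩
        · show al = gapsRev ((ll, u) :: rest)
          cases rest with
          | nil => simpa [gapsRev] using hal
          | cons b t => simpa [gapsRev] using hal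
        · show p1 = (if ((ll, u) :: rest).tail = [] then 0
                     else (((ll, u) :: rest).getLastD (0, 0)).2 + 1)
          cases rest with
          | nil => simpa using hp1
          | cons b t =>
            simp only [List.tail_cons, List.getLastD_cons] at hp1 ⊢
            exact hp1
        · cases rest with
          | nil =>
            simp only [List.getLastD_cons, List.getLastD_nil] at hlast ⊢
            omega
          | cons b t =>
            simp only [List.getLastD_cons] at hlast ⊢
            exact hlast

theorem inv_fold : ∀ (s : List (Int × Int)) (st : Int × Int × Int) (acc : List (Int × Int)),
    StInv st acc → StInv (s.foldl solveStepA st) (s.foldl mergeStep acc) := by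
  intro s
  induction s with
  | nil => intro st acc h; exact h
  | cons r t ih =>
    intro st acc h
    simp only [List.foldl_cons]
    exact ih _ _ (inv_step st acc r h)

theorem out_eq (s : List (Int × Int)) :
    ((s.foldl solveStepA (0, 0, 0)).1, (s.foldl solveStepA (0, 0, 0)).2.2)
      = (if 1 < ((s.foldl mergeStep [((-1 : Int), (0 : Int))]).reverse).length
           then (((s.foldl mergeStep [((-1 : Int), (0 : Int))]).reverse).headD (0, 0)).2 + 1
           else 0,
         gapsOf ((s.foldl mergeStep [((-1 : Int), (0 : Int))]).reverse)) := by
  have hinv0 : StInv (0, 0, 0) [((-1 : Int), (0 : Int))] :=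
    ⟨by simp, rfl, rfl, rfl, le_refl 0⟩
  obtain ⟨hne, hprev, hal, hp1, hlast⟩ :=
    inv_fold s (0, 0, 0) [((-1 : Int), (0 : Int))] hinv0
  cases hA : s.foldl mergeStep [((-1 : Int), (0 : Int))] with
  | nil => rw [hA] at hne; exact absurd rfl hne
  | cons hd rest =>
    rw [hA] at hal hp1 hlast
    rw [gapsOf_reverse, List.length_reverse, headD_reverse, hal, hp1]
    cases rest with
    | nil => simp
    | cons b t => simp

-- ===== VERDICT (by name: the statement is the Claim_ definition above) =====
theorem solve_spec : Claim_equal_solve := by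
  intro ranges _hdom
  unfold Spec_solve
  exact out_eq (PySem.List.sorted2 ranges Prod.fst Prod.snd)
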